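-- pv_equiv track=rewrite | github.com/FractalGiraffe/StereoMaxLikelihood | processing.py | reconstruct_optimal_match
-- ===== SOURCE A (Python) =====
-- def reconstruct_optimal_match(i, j, memo, disparity_vector):
--     if i == 0 and j == 0:
--         return disparity_vector
--     elif memo[i][j] == 2:
--         disparity_vector.append(0)
--         return reconstruct_optimal_match(i - 1, j, memo, disparity_vector)
--     elif memo[i][j] == 3:
--         return reconstruct_optimal_match(i, j - 1, memo, disparity_vector)
--     else:
--         disparity_vector.append(abs(i - j))
--         return reconstruct_optimal_match(i - 1, j - 1, memo, disparity_vector)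
-- ===== SOURCE B (Python) =====
-- def _delta(v):
--     # how far the traceback moves for code v
--     if v == 2:
--         return (1, 0)
--     if v == 3:
--         return (0, 1)
--     return (1, 1)
--
--
-- def reconstruct_optimal_match(i, j, memo, disparity_vector):
--     # Two staged passes instead of A's output-threading recursion:
--     # 1) walk the traceback once, recording the visited (i, j, code) triples;
--     # 2) turn that path into the appended disparities with one comprehension.
--     path = []
--     while (i, j) != (0, 0):
--         v = memo[i][j]
--         path.append((i, j, v))
--         di, dj = _delta(v)
--         i -= di
--         j -= dj
--     disparity_vector += [0 if v == 2 else abs(pi - pj)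
--                          for (pi, pj, v) in path if v != 3]
--     return disparity_vector
-- ===== Notes on version B (the rewrite author's own statement) =====
-- stated objective: alternative
-- what changed: A appends to the output list inside a branching tail recursion; B first records the traceback path iteratively as (i, j, code) triples using a delta-lookup step, then derives the appended disparities from the recorded path with a single filter/map comprehension, extending disparity_vector once. Pre_ admits exactly the inputs whose traceback path stays inside the matrix and ends at (0,0), i.e. where A returns instead of raising IndexError.
import Mathlib
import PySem

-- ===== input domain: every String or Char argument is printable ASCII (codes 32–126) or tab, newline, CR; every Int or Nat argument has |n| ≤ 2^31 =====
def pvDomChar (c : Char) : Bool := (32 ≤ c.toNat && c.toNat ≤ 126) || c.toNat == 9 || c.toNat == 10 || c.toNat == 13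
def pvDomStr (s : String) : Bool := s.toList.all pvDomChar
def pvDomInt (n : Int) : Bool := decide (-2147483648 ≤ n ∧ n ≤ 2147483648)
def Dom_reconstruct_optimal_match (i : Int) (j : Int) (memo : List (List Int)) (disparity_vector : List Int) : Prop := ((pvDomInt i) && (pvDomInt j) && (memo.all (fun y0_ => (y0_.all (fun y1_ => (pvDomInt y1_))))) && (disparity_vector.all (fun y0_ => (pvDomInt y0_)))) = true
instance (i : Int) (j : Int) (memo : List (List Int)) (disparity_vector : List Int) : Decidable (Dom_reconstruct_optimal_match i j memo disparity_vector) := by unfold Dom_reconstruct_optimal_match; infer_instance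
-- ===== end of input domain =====

-- B replaces A's output-threading branching tail recursion by two staged passes: record the
-- traceback path as (i, j, code) triples with a delta-lookup step, then derive the appended
-- disparities from the path with one filter/map, extending disparity_vector once (same returned
-- object and same final list contents; the equivalence proved here is about the return value).

-- ===== PORT A =====
-- A's tail recursion, with fuel as a totality guard only (inside Pre_ every step
-- decreases i+j by at least 1, so i.toNat + j.toNat + 1 steps always suffice and the
-- fuel = 0 branch is never reached there).
def pvAWalk : Nat → Int → Int → List (List Int) → List Int → List Int
  | 0, _, _, _, dv => dv
  | f+1, i, j, memo, dv =>
    if i = 0 ∧ j = 0 then dv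
    else
      match PySem.List.pyGet? memo i with
      | none => dv      -- IndexError in Python: outside Pre_, value irrelevant
      | some row =>
        match PySem.List.pyGet? row j with
        | none => dv    -- IndexError in Python: outside Pre_, value irrelevant
        | some v =>
          if v = 2 then pvAWalk f (i - 1) j memo (dv ++ [0])
          else if v = 3 then pvAWalk f i (j - 1) memo dv
          else pvAWalk f (i - 1) (j - 1) memo (dv ++ [|i - j|])

def reconstruct_optimal_match (i : Int) (j : Int) (memo : List (List Int)) (disparity_vector : List Int) : List Int :=
  pvAWalk (i.toNat + j.toNat + 1) i j memo disparity_vector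

-- ===== PORT B =====
-- Source B's _delta: how far the traceback moves for code v.
def pvBDelta (v : Int) : Int × Int :=
  if v = 2 then (1, 0) else if v = 3 then (0, 1) else (1, 1)

-- Source B's stage-1 while loop: the recorded path of (i, j, code) triples
-- (fuel is a totality guard only; an out-of-range read = Python IndexError, outside Pre_).
def pvBPath : Nat → Int → Int → List (List Int) → List (Int × Int × Int)
  | 0, _, _, _ => []
  | f+1, i, j, memo =>
    if (i, j) = ((0 : Int), (0 : Int)) then []
    else
      match (PySem.List.pyGet? memo i).bind (fun row => PySem.List.pyGet? row j) with
      | none => []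
      | some v => (i, j, v) :: pvBPath f (i - (pvBDelta v).1) (j - (pvBDelta v).2) memo

-- Source B's stage-2 comprehension over the recorded path.
def pvBRender (path : List (Int × Int × Int)) : List Int :=
  (path.filter (fun t => t.2.2 ≠ 3)).map (fun t => if t.2.2 = 2 then 0 else |t.1 - t.2.1|)

def reconstruct_optimal_match_alt (i : Int) (j : Int) (memo : List (List Int)) (disparity_vector : List Int) : List Int :=
  disparity_vector ++ pvBRender (pvBPath (i.toNat + j.toNat + 1) i j memo)

-- ===== PRECONDITION & SPEC =====
-- One step of the traceback: the position after reading memo at p (none = Python IndexError).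
def pvNextPos (memo : List (List Int)) (p : Int × Int) : Option (Int × Int) :=
  match PySem.List.pyGet? memo p.1 with
  | none => none
  | some row =>
    match PySem.List.pyGet? row p.2 with
    | none => none
    | some v =>
      if v = 2 then some (p.1 - 1, p.2)
      else if v = 3 then some (p.1, p.2 - 1)
      else some (p.1 - 1, p.2 - 1)

-- (0, 0) is absorbing; an out-of-range read is absorbing as none.
def pvTraceStep (memo : List (List Int)) (o : Option (Int × Int)) : Option (Int × Int) :=
  o.bind (fun p => if p = (0, 0) then some p else pvNextPos memo p)

-- Pre_: the traceback path starting at (i, j) is well-formed — following the matrix's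
-- codes it stays inside the matrix and ends at (0, 0). This is the function's natural
-- domain (exactly where Python A returns instead of raising IndexError). A path that
-- ends at (0, 0) makes at most (memo.length - 1) + (longest row - 1) moves, so
-- memo.length + total row length steps always decide it.
def Pre_reconstruct_optimal_match (i : Int) (j : Int) (memo : List (List Int)) (disparity_vector : List Int) : Prop :=
  (pvTraceStep memo)^[memo.length + (memo.map List.length).sum] (some (i, j)) = some (0, 0)
instance (i : Int) (j : Int) (memo : List (List Int)) (disparity_vector : List Int) : Decidable (Pre_reconstruct_optimal_match i j memo disparity_vector) := by unfold Pre_reconstruct_optimal_match; infer_instance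

def pvWitness_reconstruct_optimal_match : Int × Int × List (List Int) × List Int := (1, 1, [[0, 3], [2, 0]], [])

def Spec_reconstruct_optimal_match (i : Int) (j : Int) (memo : List (List Int)) (disparity_vector : List Int) (out : List Int) : Prop := out = reconstruct_optimal_match_alt i j memo disparity_vector
instance (i : Int) (j : Int) (memo : List (List Int)) (disparity_vector : List Int) (out : List Int) : Decidable (Spec_reconstruct_optimal_match i j memo disparity_vector out) := by unfold Spec_reconstruct_optimal_match; infer_instance

-- ===== CLAIM (what is proved, stated in full; the proofs are below) =====
def Claim_equal_reconstruct_optimal_match : Prop := ∀ (i : Int) (j : Int) (memo : List (List Int)) (disparity_vector : List Int), Dom_reconstruct_optimal_match i j memo disparity_vector → Pre_reconstruct_optimal_match i j memo disparity_vector → Spec_reconstruct_optimal_match i j memo disparity_vector (reconstruct_optimal_match i j memo disparity_vector)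

-- ===== LEMMAS AND PROOFS =====
-- A's accumulator-threading recursion equals dv ++ the rendering of B's recorded path,
-- for every fuel and every state (the claim only needs it inside Pre_).
lemma pvAWalk_eq_render (f : Nat) : ∀ (i j : Int) (memo : List (List Int)) (dv : List Int),
    pvAWalk f i j memo dv = dv ++ pvBRender (pvBPath f i j memo) := by
  induction f with
  | zero => intro i j memo dv; simp [pvAWalk, pvBPath, pvBRender]
  | succ f ih =>
    intro i j memo dv
    simp only [pvAWalk, pvBPath]
    by_cases h0 : i = 0 ∧ j = 0
    · simp [h0, pvBRender]
    · rw [if_neg h0, if_neg (by simpa [Prod.ext_iff] using h0)]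
      cases hm : PySem.List.pyGet? memo i with
      | none => simp [pvBRender]
      | some row =>
        dsimp only [Option.bind]
        cases hr : PySem.List.pyGet? row j with
        | none => simp [pvBRender]
        | some v =>
          dsimp only
          by_cases h2 : v = 2
          · simp [h2, ih, pvBDelta, pvBRender, List.append_assoc]
          · by_cases h3 : v = 3
            · simp [h3, ih, pvBDelta, pvBRender]
            · simp [h2, h3, ih, pvBDelta, pvBRender, List.append_assoc]

-- ===== VERDICT (by name: the statement is the Claim_ definition above) =====
theorem reconstruct_optimal_match_spec : Claim_equal_reconstruct_optimal_match := by
  intro i j memo disparity_vector _dom _pre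
  unfold Spec_reconstruct_optimal_match reconstruct_optimal_match reconstruct_optimal_match_alt
  exact pvAWalk_eq_render _ i j memo disparity_vector
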